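-- pv_equiv track=rewrite | github.com/keras-team/keras-hub | tools/checkpoint_conversion/convert_mix_transformer.py | get_indices_from_depths
-- ===== SOURCE A (Python) =====
-- def get_indices_from_depths(depths):
--     proj_indices = []
--     norm_indices = []
--     hierarchical_encoder_indices = []
--
--     current_layer_idx = 1
--
--     for layer_idx, depth in enumerate(depths):
--         # Add projection index (before the hierarchical encoders)
--         proj_indices.append(current_layer_idx)
--
--         # Hierarchical encoder block indices
--         for block_idx in range(depth):
--             hierarchical_encoder_indices.append(
--                 (current_layer_idx + 1, layer_idx, block_idx)
--             )
--             current_layer_idx += 1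
--
--         # Add normalization index (after the hierarchical encoders)
--         norm_indices.append(current_layer_idx + 1)
--
--         # Skip to the next layer after output_level
--         current_layer_idx += 3
--
--     return proj_indices, norm_indices, hierarchical_encoder_indices
-- ===== SOURCE B (Python) =====
-- def get_indices_from_depths(depths):
--     # Precompute per-layer start offsets, then emit the three outputs in
--     # separate passes.  max(d, 0) is the number of encoder blocks a layer
--     # actually emits (range(d) is empty for d <= 0).
--     starts = []
--     s = 1
--     for d in depths:
--         starts.append(s)
--         s += max(d, 0) + 3
--     proj_indices = list(starts)
--     norm_indices = [st + max(d, 0) + 1 for st, d in zip(starts, depths)]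
--     hierarchical_encoder_indices = [
--         (st + b + 1, i, b)
--         for i, (st, d) in enumerate(zip(starts, depths))
--         for b in range(d)
--     ]
--     return proj_indices, norm_indices, hierarchical_encoder_indices
-- ===== Notes on version B (the rewrite author's own statement) =====
-- stated objective: alternative
-- what changed: A threads one mutable counter through nested loops; B first builds a per-layer start-offset table by accumulating max(d,0)+3, then emits the three index lists in three independent passes (copy, zip-map, flat comprehension).
import Mathlib
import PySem

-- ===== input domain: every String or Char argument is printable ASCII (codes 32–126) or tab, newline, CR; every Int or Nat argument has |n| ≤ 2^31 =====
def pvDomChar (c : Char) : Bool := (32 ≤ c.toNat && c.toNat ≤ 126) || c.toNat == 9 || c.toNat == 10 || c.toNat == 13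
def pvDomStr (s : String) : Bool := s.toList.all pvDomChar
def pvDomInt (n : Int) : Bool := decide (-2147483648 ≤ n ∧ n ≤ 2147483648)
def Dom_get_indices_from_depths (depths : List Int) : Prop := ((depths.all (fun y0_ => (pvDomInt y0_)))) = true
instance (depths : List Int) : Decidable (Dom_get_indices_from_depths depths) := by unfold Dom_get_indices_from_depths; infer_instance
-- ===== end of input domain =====

-- B replaces A's single fused loop threading a mutable counter by a precomputed
-- start-offset table followed by three independent passes (objective: alternative decomposition).

-- ===== PORT A =====
-- literal transliteration of A: one fold over enumerate(depths) threading
-- (proj, norm, hier, current_layer_idx); the inner `for block_idx in range(depth)`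
-- is a fold over pyRange threading (hier, current_layer_idx).
def get_indices_from_depths (depths : List Int) : List Int × List Int × (List (Int × Int × Int)) :=
  let st := (PySem.List.enumerate depths 0).foldl
    (fun (acc : List Int × List Int × List (Int × Int × Int) × Int) p =>
      let proj := acc.1 ++ [acc.2.2.2]
      let inner := (PySem.List.pyRange 0 p.2 1).foldl
        (fun (hc : List (Int × Int × Int) × Int) b =>
          (hc.1 ++ [(hc.2 + 1, p.1, b)], hc.2 + 1))
        (acc.2.2.1, acc.2.2.2)
      let norm := acc.2.1 ++ [inner.2 + 1]
      (proj, norm, inner.1, inner.2 + 3))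
    ([], [], [], 1)
  (st.1, st.2.1, st.2.2.1)

-- ===== PORT B =====
def get_indices_from_depths_alt (depths : List Int) : List Int × List Int × (List (Int × Int × Int)) :=
  let starts := (depths.foldl
    (fun (p : List Int × Int) d => (p.1 ++ [p.2], p.2 + max d 0 + 3)) ([], 1)).1
  let proj := starts
  let norm := (starts.zip depths).map (fun sd => sd.1 + max sd.2 0 + 1)
  let hier := (PySem.List.enumerate (starts.zip depths) 0).flatMap
    (fun q => (PySem.List.pyRange 0 q.2.2 1).map (fun b => (q.2.1 + b + 1, q.1, b)))
  (proj, norm, hier)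

-- ===== PRECONDITION & SPEC =====
def Spec_get_indices_from_depths (depths : List Int) (out : List Int × List Int × (List (Int × Int × Int))) : Prop := out = get_indices_from_depths_alt depths
instance (depths : List Int) (out : List Int × List Int × (List (Int × Int × Int))) : Decidable (Spec_get_indices_from_depths depths out) := by unfold Spec_get_indices_from_depths; infer_instance

-- ===== CLAIM (what is proved, stated in full; the proofs are below) =====
def Claim_equal_get_indices_from_depths : Prop := ∀ (depths : List Int), Dom_get_indices_from_depths depths → Spec_get_indices_from_depths depths (get_indices_from_depths depths)

-- ===== LEMMAS AND PROOFS =====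

-- the start offset of each layer: head is c, then advance by (blocks emitted) + 3
def pvStarts (c : Int) : List Int → List Int
  | [] => []
  | d :: t => c :: pvStarts (c + max d 0 + 3) t

theorem pvStarts_fold (ds : List Int) : ∀ (acc : List Int) (c : Int),
    (ds.foldl (fun (p : List Int × Int) d => (p.1 ++ [p.2], p.2 + max d 0 + 3)) (acc, c))
      = (acc ++ pvStarts c ds, c + ((ds.map (fun d => max d 0 + 3)).sum)) := by
  induction ds with
  | nil => simp [pvStarts]
  | cons d t ih =>
      intro acc c
      simp only [List.foldl_cons, ih, pvStarts, List.map_cons, List.sum_cons, Prod.mk.injEq]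
      exact ⟨by simp, by ring⟩

-- A's inner block loop, characterized
theorem pv_inner (n : Nat) (li : Int) : ∀ (h : List (Int × Int × Int)) (c : Int),
    (((List.range n).map (fun k : Nat => (k : Int))).foldl
        (fun (hc : List (Int × Int × Int) × Int) b => (hc.1 ++ [(hc.2 + 1, li, b)], hc.2 + 1)) (h, c))
      = (h ++ (List.range n).map (fun k : Nat => ((c + k + 1 : Int), li, (k : Int))), c + n) := by
  induction n with
  | zero => simp
  | succ m ih =>
      intro h c
      rw [List.range_succ, List.map_append, List.foldl_append, ih]
      simp only [List.map_cons, List.map_nil, List.foldl_cons, List.foldl_nil, Prod.mk.injEq]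
      exact ⟨by simp, by push_cast; ring⟩

theorem pv_pyRange_nat (d : Int) :
    PySem.List.pyRange 0 d 1 = (List.range d.toNat).map (fun k : Nat => (k : Int)) := by
  rw [PySem.List.pyRange_one]
  simp [List.map_eq_flatMap]


-- A's outer loop, characterized in terms of B's three passes
theorem pv_outer (ds : List Int) : ∀ (li : Int) (p n : List Int) (h : List (Int × Int × Int)) (c : Int),
    ((PySem.List.enumerate ds li).foldl
      (fun (acc : List Int × List Int × List (Int × Int × Int) × Int) q =>
        let proj := acc.1 ++ [acc.2.2.2]
        let inner := (PySem.List.pyRange 0 q.2 1).foldl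
          (fun (hc : List (Int × Int × Int) × Int) b =>
            (hc.1 ++ [(hc.2 + 1, q.1, b)], hc.2 + 1))
          (acc.2.2.1, acc.2.2.2)
        let norm := acc.2.1 ++ [inner.2 + 1]
        (proj, norm, inner.1, inner.2 + 3))
      (p, n, h, c))
    = (p ++ pvStarts c ds,
       n ++ ((pvStarts c ds).zip ds).map (fun sd => sd.1 + max sd.2 0 + 1),
       h ++ (PySem.List.enumerate ((pvStarts c ds).zip ds) li).flatMap
          (fun q => (PySem.List.pyRange 0 q.2.2 1).map (fun b => (q.2.1 + b + 1, q.1, b))),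
       c + ((ds.map (fun d => max d 0 + 3)).sum)) := by
  induction ds with
  | nil => simp [pvStarts, PySem.List.enumerate_nil]
  | cons d t ih =>
      intro li p n h c
      rw [PySem.List.enumerate_cons]
      simp only [List.foldl_cons]
      rw [pv_pyRange_nat d, pv_inner]
      rw [ih]
      have hd : ((d.toNat : Int)) = max d 0 := Int.ofNat_toNat d
      simp only [pvStarts, List.zip_cons_cons, PySem.List.enumerate_cons, List.flatMap_cons,
        pv_pyRange_nat, hd, List.map_map, Prod.mk.injEq, List.append_assoc,
        List.cons_append, List.nil_append]
      and_intros <;> first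
        | trivial
        | ((try simp only [List.map_cons, List.sum_cons]); ring)

-- ===== VERDICT (by name: the statement is the Claim_ definition above) =====
theorem get_indices_from_depths_spec : Claim_equal_get_indices_from_depths := by
  intro depths _
  unfold Spec_get_indices_from_depths get_indices_from_depths get_indices_from_depths_alt
  rw [pvStarts_fold, pv_outer]
  simp
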